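-- pv_equiv track=rewrite | github.com/Plhys18/genewebPublic | backend/lib/genes/gene_model.py | _randomColorOf
-- ===== SOURCE A (Python) =====
-- def _randomColorOf(text: str):
--     """
--     Mimic the Dart hashing approach for a color.
--     We'll return a hex string like '#RRGGBB'
--     """
--     hash_val = 0
--     for ch in text:
--         hash_val = ord(ch) + ((hash_val << 5) - hash_val)
--     final_hash = abs(hash_val) % (256 * 256 * 256)
--     red = (final_hash & 0xFF0000) >> 16
--     green = (final_hash & 0xFF00) >> 8
--     blue = (final_hash & 0xFF)
--     return f"#{red:02X}{green:02X}{blue:02X}"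
-- ===== SOURCE B (Python) =====
-- def _randomColorOf(text: str):
--     """
--     Same hash-color as A, computed as a direct base-31 polynomial:
--     (h<<5)-h is 31*h, so A's loop is Horner evaluation. Evaluate the
--     polynomial explicitly over the reversed string with a running power,
--     and format all six hex digits at once.
--     """
--     total = 0
--     power = 1
--     for ch in reversed(text):
--         total += ord(ch) * power
--         power *= 31
--     final_hash = abs(total) % (256 * 256 * 256)
--     return f"#{final_hash:06X}"
-- ===== Notes on version B (the rewrite author's own statement) =====
-- stated objective: alternative
-- what changed: Replaces A's Horner-style loop hash_val = ord(ch) + (hash_val<<5) - hash_val (i.e. 31*h) and per-channel bit-mask/shift 2-digit formatting by an explicit base-31 polynomial evaluation over the reversed string with a running power accumulator, formatting all six hex digits in one step with f'#{final:06X}'.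
import Mathlib
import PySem

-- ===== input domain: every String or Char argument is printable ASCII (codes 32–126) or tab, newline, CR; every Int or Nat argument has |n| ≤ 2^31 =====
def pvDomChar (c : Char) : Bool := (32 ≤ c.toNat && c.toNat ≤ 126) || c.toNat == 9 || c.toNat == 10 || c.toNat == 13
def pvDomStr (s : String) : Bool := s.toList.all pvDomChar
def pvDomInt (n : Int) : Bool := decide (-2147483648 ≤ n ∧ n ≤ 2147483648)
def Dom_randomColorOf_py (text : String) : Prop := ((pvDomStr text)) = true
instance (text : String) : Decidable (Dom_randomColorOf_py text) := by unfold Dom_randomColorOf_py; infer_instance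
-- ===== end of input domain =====

-- B replaces A's Horner loop ((h<<5)-h = 31*h) by an explicit base-31 polynomial over the
-- reversed string with a running power, and formats six hex digits at once ('alternative').

-- f"{v:0kX}" primitive: one uppercase hex digit (exact for 0 ≤ n < 16)
def hexDigit (n : Nat) : Char := if n < 10 then Char.ofNat (48 + n) else Char.ofNat (55 + n)

-- ===== PORT A =====
-- f"{v:02X}" for 0 ≤ v < 256
def hex2 (v : Int) : List Char := [hexDigit (v.toNat / 16), hexDigit (v.toNat % 16)]

def randomColorOf_py (text : String) : String :=
  let hashVal : Int :=
    text.toList.foldl (fun h ch => (ch.toNat : Int) + ((h <<< (5 : Nat)) - h)) 0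
  let finalHash : Int := PySem.Int.mod |hashVal| (256 * 256 * 256)
  let red : Int := (PySem.Int.band finalHash 0xFF0000) >>> (16 : Nat)
  let green : Int := (PySem.Int.band finalHash 0xFF00) >>> (8 : Nat)
  let blue : Int := PySem.Int.band finalHash 0xFF
  String.ofList ('#' :: (hex2 red ++ hex2 green ++ hex2 blue))

-- ===== PORT B =====
-- f"{v:06X}" for 0 ≤ v < 16^6
def hex6 (v : Nat) : List Char :=
  [hexDigit (v / 1048576 % 16), hexDigit (v / 65536 % 16), hexDigit (v / 4096 % 16),
   hexDigit (v / 256 % 16), hexDigit (v / 16 % 16), hexDigit (v % 16)]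

def randomColorOf_py_alt (text : String) : String :=
  let tp : Int × Int :=
    text.toList.reverse.foldl
      (fun (s : Int × Int) ch => (s.1 + (ch.toNat : Int) * s.2, s.2 * 31)) (0, 1)
  let finalHash : Int := PySem.Int.mod |tp.1| (256 * 256 * 256)
  String.ofList ('#' :: hex6 finalHash.toNat)

-- ===== PRECONDITION & SPEC =====
def Spec_randomColorOf_py (text : String) (out : String) : Prop := out = randomColorOf_py_alt text
instance (text : String) (out : String) : Decidable (Spec_randomColorOf_py text out) := by unfold Spec_randomColorOf_py; infer_instance

-- ===== CLAIM (what is proved, stated in full; the proofs are below) =====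
def Claim_equal_randomColorOf_py : Prop := ∀ (text : String), Dom_randomColorOf_py text → Spec_randomColorOf_py text (randomColorOf_py text)

-- ===== LEMMAS AND PROOFS =====

-- value of a char list as a base-31 polynomial, head = least significant
def polyVal : List Char → Int
  | [] => 0
  | c :: cs => (c.toNat : Int) + 31 * polyVal cs

theorem polyVal_append_singleton (xs : List Char) (c : Char) :
    polyVal (xs ++ [c]) = polyVal xs + (c.toNat : Int) * 31 ^ xs.length := by
  induction xs with
  | nil => simp [polyVal]
  | cons x xs ih => simp [polyVal, ih, pow_succ]; ring

theorem foldA_eq (cs : List Char) : ∀ h : Int,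
    cs.foldl (fun (h : Int) (ch : Char) => (ch.toNat : Int) + ((h <<< (5 : Nat)) - h)) h
      = 31 ^ cs.length * h + polyVal cs.reverse := by
  induction cs with
  | nil => intro h; simp [polyVal]
  | cons c cs ih =>
      intro h
      rw [List.foldl_cons, ih]
      simp only [List.reverse_cons, polyVal_append_singleton, List.length_reverse,
        List.length_cons, pow_succ, Int.shiftLeft_eq]
      ring

theorem foldB_eq (rs : List Char) : ∀ t p : Int,
    rs.foldl (fun (s : Int × Int) ch => (s.1 + (ch.toNat : Int) * s.2, s.2 * 31)) (t, p)
      = (t + p * polyVal rs, p * 31 ^ rs.length) := by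
  induction rs with
  | nil => intro t p; simp [polyVal]
  | cons r rs ih =>
      intro t p
      simp only [List.foldl_cons, ih, polyVal, List.length_cons, pow_succ]
      simp only [Prod.mk.injEq]
      constructor <;> ring

-- contiguous-bit mask: n &&& (m <<< k) reads bits k… of n
theorem and_shiftLeft_mask (n m k : Nat) :
    n &&& (m <<< k) = ((n >>> k) &&& m) <<< k := by
  apply Nat.eq_of_testBit_eq
  intro i
  simp [Nat.testBit_and, Nat.testBit_shiftLeft, Nat.testBit_shiftRight]
  by_cases h : k ≤ i <;> simp [h]

theorem mask_ff0000 (n : Nat) : n &&& 16711680 = (n / 65536 % 256) * 65536 := by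
  have h : (16711680 : Nat) = 255 <<< 16 := by decide
  rw [h, and_shiftLeft_mask, Nat.shiftRight_eq_div_pow,
    Nat.and_two_pow_sub_one_eq_mod _ 8, Nat.shiftLeft_eq]

theorem mask_ff00 (n : Nat) : n &&& 65280 = (n / 256 % 256) * 256 := by
  have h : (65280 : Nat) = 255 <<< 8 := by decide
  rw [h, and_shiftLeft_mask, Nat.shiftRight_eq_div_pow,
    Nat.and_two_pow_sub_one_eq_mod _ 8, Nat.shiftLeft_eq]

theorem fmt_eq (n : Nat) (hn : n < 16777216) :
    hex2 ((PySem.Int.band (n : Int) 0xFF0000) >>> (16 : Nat))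
      ++ hex2 ((PySem.Int.band (n : Int) 0xFF00) >>> (8 : Nat))
      ++ hex2 (PySem.Int.band (n : Int) 0xFF) = hex6 n := by
  have c1 : (0xFF0000 : Int) = ((16711680 : Nat) : Int) := by norm_num
  have c2 : (0xFF00 : Int) = ((65280 : Nat) : Int) := by norm_num
  have c3 : (0xFF : Int) = ((255 : Nat) : Int) := by norm_num
  rw [c1, c2, c3, PySem.Int.band_natCast, PySem.Int.band_natCast, PySem.Int.band_natCast,
    ← Int.natCast_shiftRight, ← Int.natCast_shiftRight]
  simp only [Nat.shiftRight_eq_div_pow, mask_ff0000 n, mask_ff00 n,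
    Nat.and_two_pow_sub_one_eq_mod n 8]
  simp only [hex2, hex6, List.cons_append, List.nil_append, List.cons.injEq, and_true]
  norm_num
  refine ⟨?_, ?_, ?_, ?_, ?_, ?_⟩ <;> · congr 1; omega

-- ===== VERDICT (by name: the statement is the Claim_ definition above) =====
theorem randomColorOf_py_spec : Claim_equal_randomColorOf_py := by
  intro text _
  unfold Spec_randomColorOf_py randomColorOf_py randomColorOf_py_alt
  rw [foldA_eq, foldB_eq]
  simp only [mul_zero, zero_add, one_mul]
  set v : Int := polyVal text.toList.reverse
  set f : Int := PySem.Int.mod |v| (256 * 256 * 256) with hf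
  have hpos : (0 : Int) < 256 * 256 * 256 := by norm_num
  have h0 : 0 ≤ f := PySem.Int.mod_nonneg _ hpos
  have h1 : f < 256 * 256 * 256 := hf ▸ PySem.Int.mod_lt (a := |v|) hpos
  have hn : f = ((f.toNat : Nat) : Int) := (Int.toNat_of_nonneg h0).symm
  have hlt : f.toNat < 16777216 := by omega
  congr 1
  rw [hn]
  simp only [Int.toNat_natCast]
  exact congrArg (List.cons '#') (fmt_eq f.toNat hlt)
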